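-- pv_equiv track=rewrite | github.com/kosakkun/mm-tester | SlidingPuzzle/sample/python/main.py | solve
-- ===== SOURCE A (Python) =====
-- def solve (N, B):
--     M = N * N
--     r = []
--     c = []
--     for x in range(N):
--         for y in range(N):
--             r.append(x)
--             c.append(y)
--     return M, r, c
-- ===== SOURCE B (Python) =====
-- def solve(N, B):
--     M = N * N
--     if N <= 0:
--         return M, [], []
--     r = [i // N for i in range(M)]
--     c = [i % N for i in range(M)]
--     return M, r, c
-- ===== Notes on version B (the rewrite author's own statement) =====
-- stated objective: alternative
-- what changed: Replaces A's nested row/column loops growing r and c in lockstep with two comprehensions over the flat range of N*N cell indices, decoding each index i arithmetically into its row (i // N) and column (i % N).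
import Mathlib
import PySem

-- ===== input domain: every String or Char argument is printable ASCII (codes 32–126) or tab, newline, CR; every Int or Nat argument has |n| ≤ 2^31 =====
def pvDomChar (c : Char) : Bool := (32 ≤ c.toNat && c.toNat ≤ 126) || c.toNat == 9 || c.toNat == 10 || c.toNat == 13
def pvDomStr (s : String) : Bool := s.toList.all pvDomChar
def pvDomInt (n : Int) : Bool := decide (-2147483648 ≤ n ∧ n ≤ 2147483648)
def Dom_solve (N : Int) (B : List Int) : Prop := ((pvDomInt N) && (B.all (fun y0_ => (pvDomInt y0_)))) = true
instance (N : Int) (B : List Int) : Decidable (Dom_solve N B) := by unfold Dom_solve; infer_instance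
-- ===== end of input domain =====

-- B replaces A's nested row/column loops by two comprehensions over the flat
-- range of N*N cell indices, decoding each index i into its row i // N and column i % N.

-- ===== PORT A =====
-- for x in range(N): for y in range(N): r.append(x); c.append(y)
def solve (N : Int) (B : List Int) : Int × List Int × List Int :=
  let M := N * N
  let rc := (PySem.List.pyRange 0 N 1).foldl
    (fun rc x => (PySem.List.pyRange 0 N 1).foldl
      (fun rc y => (rc.1 ++ [x], rc.2 ++ [y])) rc)
    (([] : List Int), ([] : List Int))
  (M, rc.1, rc.2)

-- ===== PORT B =====
-- if N <= 0: return M, [], []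
-- r = [i // N for i in range(M)]; c = [i % N for i in range(M)]
def solve_alt (N : Int) (B : List Int) : Int × List Int × List Int :=
  let M := N * N
  if N ≤ 0 then (M, [], [])
  else
    let r := (PySem.List.pyRange 0 M 1).map (fun i => PySem.Int.floordiv i N)
    let c := (PySem.List.pyRange 0 M 1).map (fun i => PySem.Int.mod i N)
    (M, r, c)

-- ===== PRECONDITION & SPEC =====
def Spec_solve (N : Int) (B : List Int) (out : Int × List Int × List Int) : Prop := out = solve_alt N B
instance (N : Int) (B : List Int) (out : Int × List Int × List Int) : Decidable (Spec_solve N B out) := by unfold Spec_solve; infer_instance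

-- ===== CLAIM (what is proved, stated in full; the proofs are below) =====
def Claim_equal_solve : Prop := ∀ (N : Int) (B : List Int), Dom_solve N B → Spec_solve N B (solve N B)

-- ===== LEMMAS AND PROOFS =====

-- A's inner loop: appends x to r once per element of l, and l itself to c.
theorem pv_inner (l : List Int) (x : Int) (r c : List Int) :
    l.foldl (fun rc y => (rc.1 ++ [x], rc.2 ++ [y])) (r, c)
      = (r ++ List.replicate l.length x, c ++ l) := by
  induction l generalizing r c with
  | nil => simp
  | cons y t ih => simp [ih, List.replicate_succ, List.append_assoc]

-- A's outer loop over any list L, with the inner list fixed to `inner`.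
theorem pv_outer (L inner : List Int) (r c : List Int) :
    L.foldl (fun rc x => inner.foldl (fun rc y => (rc.1 ++ [x], rc.2 ++ [y])) rc) (r, c)
      = (r ++ L.flatMap (fun x => List.replicate inner.length x),
         c ++ (List.replicate L.length inner).flatten) := by
  induction L generalizing r c with
  | nil => simp
  | cons x t ih =>
      simp only [List.foldl_cons, pv_inner, ih, List.flatMap_cons, List.length_cons,
        List.replicate_succ, List.flatten_cons, List.append_assoc]

-- decoding the m-th block of N consecutive indices
theorem pv_block (N : Int) (hN : 0 < N) (m : Nat) :
    (PySem.List.pyRange (m * N) (m * N + N) 1).map (fun i => PySem.Int.floordiv i N)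
        = List.replicate N.toNat (m : Int)
    ∧ (PySem.List.pyRange (m * N) (m * N + N) 1).map (fun i => PySem.Int.mod i N)
        = PySem.List.pyRange 0 N 1 := by
  have hb : PySem.List.pyRange ((m : Int) * N) (m * N + N) 1
      = (List.range N.toNat).map (fun k : Nat => (m : Int) * N + (k : Int)) := by
    rw [PySem.List.pyRange_one]
    have h1 : ((m : Int) * N + N - m * N) = N := by ring
    rw [h1]
  have hdiv : ∀ k : Nat, k < N.toNat →
      PySem.Int.floordiv ((m : Int) * N + k) N = m := by
    intro k hk
    have hk' : (k : Int) < N := by omega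
    rw [PySem.Int.floordiv_eq_ediv_of_pos hN,
      show (m : Int) * N + k = (k : Int) + m * N by ring,
      Int.add_mul_ediv_right _ _ (by omega : N ≠ 0),
      Int.ediv_eq_zero_of_lt (by positivity) hk']
    ring
  have hmod : ∀ k : Nat, k < N.toNat →
      PySem.Int.mod ((m : Int) * N + k) N = k := by
    intro k hk
    have hk' : (k : Int) < N := by omega
    rw [PySem.Int.mod_eq_emod_of_pos hN,
      show (m : Int) * N + k = (k : Int) + N * m by ring,
      Int.add_mul_emod_self_left]
    exact Int.emod_eq_of_lt (by positivity) hk'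
  constructor
  · rw [hb, List.map_map, List.eq_replicate_iff]
    refine ⟨by simp, ?_⟩
    intro b hb'
    simp only [List.mem_map, List.mem_range, Function.comp] at hb'
    obtain ⟨k, hk, hbk⟩ := hb'
    rw [← hbk]
    exact hdiv k hk
  · have h0 : PySem.List.pyRange 0 N 1 = (List.range N.toNat).map (fun k : Nat => (k : Int)) := by
      rw [PySem.List.pyRange_one]
      simp only [sub_zero, zero_add]
    rw [hb, h0, List.map_map]
    apply List.map_congr_left
    intro k hk
    simp only [List.mem_range] at hk
    exact hmod k hk

-- the flat range [0, m*N) decodes into A's row/column lists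
theorem pv_flat (N : Int) (hN : 0 < N) (m : Nat) :
    (PySem.List.pyRange 0 (m * N) 1).map (fun i => PySem.Int.floordiv i N)
        = (PySem.List.pyRange 0 (m : Int) 1).flatMap (fun x => List.replicate N.toNat x)
    ∧ (PySem.List.pyRange 0 (m * N) 1).map (fun i => PySem.Int.mod i N)
        = (List.replicate m (PySem.List.pyRange 0 N 1)).flatten := by
  induction m with
  | zero => simp [PySem.List.pyRange_one_eq_nil]
  | succ m ih =>
      have hsplit : PySem.List.pyRange 0 ((m + 1 : Nat) * N) 1
          = PySem.List.pyRange 0 (m * N) 1 ++ PySem.List.pyRange (m * N) (m * N + N) 1 := by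
        have := PySem.List.pyRange_one_append 0 ((m : Int) * N) ((m : Int) * N + N)
          (by positivity) (by omega)
        rw [show ((m + 1 : Nat) : Int) * N = (m : Int) * N + N by push_cast; ring]
        exact this
      have hr : PySem.List.pyRange 0 ((m + 1 : Nat) : Int) 1
          = PySem.List.pyRange 0 (m : Int) 1 ++ [(m : Int)] := by
        rw [show ((m + 1 : Nat) : Int) = (m : Int) + 1 by push_cast; ring]
        exact PySem.List.pyRange_one_succ_right (by positivity)
      obtain ⟨hq, hrem⟩ := pv_block N hN m
      constructor
      · rw [hsplit, List.map_append, ih.1, hq, hr]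
        simp
      · rw [hsplit, List.map_append, ih.2, hrem]
        simp [List.replicate_succ']

-- ===== VERDICT (by name: the statement is the Claim_ definition above) =====
theorem solve_spec : Claim_equal_solve := by
  intro N B _
  show solve N B = solve_alt N B
  by_cases hN : N ≤ 0
  · simp [solve, solve_alt, hN, PySem.List.pyRange_one_eq_nil hN]
  · rw [not_le] at hN
    have hm : ((N.toNat : Int)) = N := Int.toNat_of_nonneg (le_of_lt hN)
    obtain ⟨hq, hrem⟩ := pv_flat N hN N.toNat
    rw [hm] at hq hrem
    simp only [solve, solve_alt, if_neg (not_le.mpr hN), pv_outer,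
      List.nil_append, PySem.List.length_pyRange_one]
    rw [hq, hrem]
    simp
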